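-- pv_equiv track=rewrite | github.com/Darshan-dlr/Py2048 | logic/logic.py | merge_tiles
-- ===== SOURCE A (Python) =====
-- def merge_tiles(row):
--     """
--     Merges identical tiles in a row.
--
--     :param row: The row to merge tiles in.
--     :type row: list
--     :return: The row after merging tiles.
--     :rtype: list
--     """
--     new_row = [val for val in row if val != 0]
--     for i in range(len(new_row) - 1):
--         if new_row[i] == new_row[i + 1]:
--             new_row[i] *= 2
--             new_row[i + 1] = 0
--     new_row = [val for val in new_row if val != 0]
--     return new_row + [0] * (len(row) - len(new_row))
-- ===== SOURCE B (Python) =====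
-- def merge_tiles(row):
--     tiles = [v for v in row if v != 0]
--     result = []
--     i = 0
--     while i < len(tiles):
--         if i + 1 < len(tiles) and tiles[i] == tiles[i + 1]:
--             result.append(tiles[i] * 2)
--             i += 2
--         else:
--             result.append(tiles[i])
--             i += 1
--     return result + [0] * (len(row) - len(result))
-- ===== Notes on version B (the rewrite author's own statement) =====
-- stated objective: simpler
-- what changed: Replaces A's mark-with-zero-in-place-then-refilter pass (mutating the filtered list by index and filtering again) with a single forward build over the zero-free tiles using a skip-ahead pointer that emits the merged value and jumps by 2.
import Mathlib
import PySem

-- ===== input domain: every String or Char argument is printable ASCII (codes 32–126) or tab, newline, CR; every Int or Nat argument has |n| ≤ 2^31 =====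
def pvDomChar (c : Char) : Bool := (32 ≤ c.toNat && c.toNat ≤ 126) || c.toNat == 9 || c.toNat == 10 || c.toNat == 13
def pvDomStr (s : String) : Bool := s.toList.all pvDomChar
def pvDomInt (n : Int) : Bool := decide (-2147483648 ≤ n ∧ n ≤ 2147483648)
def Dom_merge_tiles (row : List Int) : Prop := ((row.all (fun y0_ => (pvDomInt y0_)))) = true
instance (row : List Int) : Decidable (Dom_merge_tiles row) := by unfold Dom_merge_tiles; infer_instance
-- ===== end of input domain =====

-- B merges adjacent equal tiles in one forward build with a skip-ahead pointer instead of
-- A's zero-marking mutation pass followed by a second zero filter (objective: simpler).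

-- ===== PORT A =====
-- one iteration of A's for-loop body at index i (mutates the list state)
def mergeStep (cur : List Int) (i : Nat) : List Int :=
  if cur.getD i 0 = cur.getD (i + 1) 0 then
    (cur.set i (cur.getD i 0 * 2)).set (i + 1) 0
  else cur

-- A's 'for i in range(len(new_row) - 1)' loop
def mergePass (l : List Int) : List Int :=
  (List.range (l.length - 1)).foldl mergeStep l

def merge_tiles (row : List Int) : List Int :=
  let new_row := row.filter (fun v => v != 0)
  let new_row2 := mergePass new_row
  let new_row3 := new_row2.filter (fun v => v != 0)
  new_row3 ++ List.replicate (row.length - new_row3.length) 0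

-- ===== PORT B =====
-- B's while loop over `tiles` with index i: cons x*2 and skip 2 on a match, else cons x and advance 1
def mergeLoop : List Int → List Int
  | [] => []
  | [x] => [x]
  | x :: y :: rest => if x = y then (x * 2) :: mergeLoop rest else x :: mergeLoop (y :: rest)

def merge_tiles_alt (row : List Int) : List Int :=
  let tiles := row.filter (fun v => v != 0)
  let result := mergeLoop tiles
  result ++ List.replicate (row.length - result.length) 0

-- ===== PRECONDITION & SPEC =====
def Spec_merge_tiles (row : List Int) (out : List Int) : Prop := out = merge_tiles_alt row
instance (row : List Int) (out : List Int) : Decidable (Spec_merge_tiles row out) := by unfold Spec_merge_tiles; infer_instance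

-- ===== CLAIM (what is proved, stated in full; the proofs are below) =====
def Claim_equal_merge_tiles : Prop := ∀ (row : List Int), Dom_merge_tiles row → Spec_merge_tiles row (merge_tiles row)

-- ===== LEMMAS AND PROOFS =====

theorem mergeStep_cons (a : Int) (l : List Int) (i : Nat) :
    mergeStep (a :: l) (i + 1) = a :: mergeStep l i := by
  simp only [mergeStep, List.getD_cons_succ, List.set_cons_succ]
  split_ifs <;> rfl

theorem foldl_range'_shift (n : Nat) : ∀ (s : Nat) (a : Int) (l : List Int),
    (List.range' (s + 1) n).foldl mergeStep (a :: l) = a :: (List.range' s n).foldl mergeStep l := by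
  induction n with
  | zero => intro s a l; simp
  | succ n ih =>
      intro s a l
      rw [List.range'_succ, List.range'_succ]
      simp only [List.foldl_cons, mergeStep_cons]
      exact ih (s + 1) a (mergeStep l s)

theorem mergePass_single (x : Int) : mergePass [x] = [x] := rfl

theorem mergePass_cons_ne (x y : Int) (rest : List Int) (h : x ≠ y) :
    mergePass (x :: y :: rest) = x :: mergePass (y :: rest) := by
  unfold mergePass
  simp only [List.length_cons, Nat.add_sub_cancel]
  rw [List.range_eq_range', List.range'_succ, List.foldl_cons]
  have h0 : mergeStep (x :: y :: rest) 0 = x :: y :: rest := by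
    simp [mergeStep, h]
  rw [h0]
  rw [show (0 : Nat) + 1 = 0 + 1 from rfl, foldl_range'_shift, ← List.range_eq_range']

theorem mergePass_cons_eq (x : Int) (rest : List Int) :
    mergePass (x :: x :: rest) = (x * 2) :: mergePass (0 :: rest) := by
  unfold mergePass
  simp only [List.length_cons, Nat.add_sub_cancel]
  rw [List.range_eq_range', List.range'_succ, List.foldl_cons]
  have h0 : mergeStep (x :: x :: rest) 0 = (x * 2) :: 0 :: rest := by
    simp [mergeStep]
  rw [h0]
  rw [show (0 : Nat) + 1 = 0 + 1 from rfl, foldl_range'_shift, ← List.range_eq_range']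

theorem pass_filter : ∀ (n : Nat) (l : List Int), l.length ≤ n → (∀ x ∈ l, x ≠ 0) →
    (mergePass l).filter (fun v => v != 0) = mergeLoop l := by
  intro n
  induction n with
  | zero =>
      intro l hl _
      match l, hl with
      | [], _ => rfl
  | succ n ih =>
      intro l hl h
      match l with
      | [] => rfl
      | [x] =>
          have hx : x ≠ 0 := h x (by simp)
          simp [mergePass_single, mergeLoop, hx]
      | x :: y :: rest =>
          have hx : x ≠ 0 := h x (by simp)
          have hy : y ≠ 0 := h y (by simp)
          by_cases hxy : x = y
          · subst hxy
            rw [mergePass_cons_eq]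
            have h2x : (x * 2) ≠ 0 := by
              intro hc; exact hx (by omega)
            have hrest : (mergePass (0 :: rest)).filter (fun v => v != 0) = mergeLoop rest := by
              match rest with
              | [] => simp [mergePass_single, mergeLoop]
              | r :: rs =>
                  have hr : r ≠ 0 := h r (by simp)
                  rw [mergePass_cons_ne 0 r rs (by exact fun hc => hr hc.symm)]
                  have : ((0 : Int) != 0) = false := by decide
                  simp only [List.filter_cons, this]
                  exact ih (r :: rs) (by simp at hl ⊢; omega)
                    (fun z hz => h z (by simp at hz ⊢; tauto))
            simp only [List.filter_cons, mergeLoop, bne_iff_ne, ne_eq, h2x,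
              not_false_eq_true, hrest]
            simp
          · rw [mergePass_cons_ne x y rest hxy]
            simp only [List.filter_cons, mergeLoop, if_neg hxy]
            have : (x != 0) = true := by simpa using hx
            rw [this]
            simp only [if_true]
            congr 1
            exact ih (y :: rest) (by simp at hl ⊢; omega)
              (fun z hz => h z (by simp at hz ⊢; tauto))

theorem merge_tiles_eq (row : List Int) : merge_tiles row = merge_tiles_alt row := by
  simp only [merge_tiles, merge_tiles_alt]
  have hnz : ∀ x ∈ row.filter (fun v => v != 0), x ≠ 0 := by
    intro x hx
    simp only [List.mem_filter, bne_iff_ne, ne_eq] at hx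
    exact hx.2
  rw [pass_filter (row.filter (fun v => v != 0)).length _ le_rfl hnz]

-- ===== VERDICT (by name: the statement is the Claim_ definition above) =====
theorem merge_tiles_spec : Claim_equal_merge_tiles := by
  intro row _
  exact merge_tiles_eq row
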